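-- pv_equiv track=rewrite | github.com/elplatt/Exp-Net-Delib | netdelib/topologies/topologies.py | get_long_path_stage_groups
-- ===== SOURCE A (Python) =====
-- def get_long_path_stage_groups(N, M, stage):
--     """Find groups for a particular stage using long-path network.
--
--     # Params
--     N: Number of participants (integer, must be > 0).
--     M: Group size (integer, must be >= 2).
--     stage: Stage of deliberation (integer, must be >= 0).
--
--     # Returns
--     A list, with each element a set of participant ids corresponding to a group.
--     Participants are given integer ids in [0, N-1].
--
--     """
--     primes = [
--         2,  3,  5,  7, 11, 13, 17, 19, 23, 29,
--         31, 37, 41, 43, 47, 53, 59, 61, 67, 71,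
--         73, 79, 83, 89, 97,101,103,107,109,113,
--         127,131,137,139,149,151,157,163,167,173,
--         179,181,191,193,197,199,211,223,227,229,
--         233,239,241,251,257,263,269,271,277,281,
--         283,293,307,311,313,317,331,337,347,349,
--         353,359,367,373,379,383,389,397,401,409,
--         419,421,431,433,439,443,449,457,461,463,
--         467,479,487,491,499,503,509,521,523,541,
--         547,557,563,569,571,577,587,593,599,601,
--         607,613,617,619,631,641,643,647,653,659,
--         661,673,677,683,691,701,709,719,727,733,
--         739,743,751,757,761,769,773,787,797,809,
--         811,821,823,827,829,839,853,857,859,863,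
--         877,881,883,887,907,911,919,929,937,941,
--         947,953,967,971,977,983,991,997,1009,1013
--     ]
--     p = primes[stage]
--     partition = []
--     for j in range(p):
--         # Generate
--         residue_class = [n for n in range(N) if n % p == j]
--         chunks = [
--             set(residue_class[k:k+M])
--             for k in range(0, len(residue_class), M)]
--         partition += chunks
--     return partition
-- ===== SOURCE B (Python) =====
-- def get_long_path_stage_groups(N, M, stage):
--     """Same result as A: partition ids [0,N) by residue class mod primes[stage],
--     each class split into chunks of size M.  B computes the 170-entry prime table
--     by trial division instead of a literal, and builds all residue classes in ONE
--     pass over range(N) (bucket by n % p) instead of scanning range(N) once per class."""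
--     primes = []
--     c = 2
--     while len(primes) < 170:
--         if all(c % q != 0 for q in primes):
--             primes.append(c)
--         c += 1
--     p = primes[stage]
--     buckets = [[] for _ in range(p)]
--     for n in range(N):
--         buckets[n % p].append(n)
--     return [set(cls[k:k+M]) for cls in buckets for k in range(0, len(cls), M)]
-- ===== Notes on version B (the rewrite author's own statement) =====
-- stated objective: faster
-- what changed: B buckets all ids in ONE pass over range(N) by n % p (instead of A's p separate filtering scans of range(N)) and computes the 170-entry prime table by trial division instead of a literal list.
import Mathlib
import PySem

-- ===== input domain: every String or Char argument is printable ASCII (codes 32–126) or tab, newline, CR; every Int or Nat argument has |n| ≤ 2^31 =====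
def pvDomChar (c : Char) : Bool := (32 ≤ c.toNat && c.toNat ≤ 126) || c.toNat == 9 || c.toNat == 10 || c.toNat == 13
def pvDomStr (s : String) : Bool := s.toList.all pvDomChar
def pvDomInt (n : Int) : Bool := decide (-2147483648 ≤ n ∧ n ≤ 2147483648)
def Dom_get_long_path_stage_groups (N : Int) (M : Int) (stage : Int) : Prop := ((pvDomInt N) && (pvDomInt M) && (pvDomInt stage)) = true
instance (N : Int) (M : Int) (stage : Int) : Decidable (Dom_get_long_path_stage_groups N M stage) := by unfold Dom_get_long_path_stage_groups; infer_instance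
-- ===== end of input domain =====

-- B buckets all ids in one pass over range(N) by n % p (instead of one filtering
-- scan of range(N) per residue class) and computes the prime table by trial division.

-- ===== PORT A =====
def get_long_path_stage_groups (N : Int) (M : Int) (stage : Int) : List (List Int) :=
  let primes : List Int := [
    2,  3,  5,  7, 11, 13, 17, 19, 23, 29,
    31, 37, 41, 43, 47, 53, 59, 61, 67, 71,
    73, 79, 83, 89, 97,101,103,107,109,113,
    127,131,137,139,149,151,157,163,167,173,
    179,181,191,193,197,199,211,223,227,229,
    233,239,241,251,257,263,269,271,277,281,
    283,293,307,311,313,317,331,337,347,349,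
    353,359,367,373,379,383,389,397,401,409,
    419,421,431,433,439,443,449,457,461,463,
    467,479,487,491,499,503,509,521,523,541,
    547,557,563,569,571,577,587,593,599,601,
    607,613,617,619,631,641,643,647,653,659,
    661,673,677,683,691,701,709,719,727,733,
    739,743,751,757,761,769,773,787,797,809,
    811,821,823,827,829,839,853,857,859,863,
    877,881,883,887,907,911,919,929,937,941,
    947,953,967,971,977,983,991,997,1009,1013]
  let p := (PySem.List.pyGet? primes stage).getD 0   -- total form; Pre_ keeps stage in range
  (PySem.List.pyRange 0 p 1).foldl (fun partition j =>
    let residue_class := (PySem.List.pyRange 0 N 1).filter (fun n => PySem.Int.mod n p == j)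
    let chunks := (PySem.List.pyRange 0 (residue_class.length : Int) M).map
      (fun k => PySem.Set.ofList (PySem.List.slice residue_class (some k) (some (k + M))))
    partition ++ chunks) []

-- ===== PORT B =====
-- Python's `while len(primes) < 170` made total with a fuel of 1012 steps
-- (c runs 2,3,…,1013; the 170th prime is 1013, so 1012 steps suffice).
def pvGenPrimes : Nat → Int → List Int → List Int
  | 0, _, acc => acc
  | fuel+1, c, acc =>
    if acc.length < 170 then
      if acc.all (fun q => PySem.Int.mod c q != 0) then
        pvGenPrimes fuel (c + 1) (acc ++ [c])
      else pvGenPrimes fuel (c + 1) acc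
    else acc

def get_long_path_stage_groups_alt (N : Int) (M : Int) (stage : Int) : List (List Int) :=
  let primes := pvGenPrimes 1012 2 []
  let p := (PySem.List.pyGet? primes stage).getD 0   -- total form; Pre_ keeps stage in range
  let buckets := (PySem.List.pyRange 0 N 1).foldl
      (fun b n => b.modify (PySem.Int.mod n p).toNat (fun cls => cls ++ [n]))
      (List.replicate p.toNat [])
  buckets.flatMap (fun cls =>
    (PySem.List.pyRange 0 (cls.length : Int) M).map
      (fun k => PySem.Set.ofList (PySem.List.slice cls (some k) (some (k + M)))))

-- ===== PRECONDITION & SPEC =====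
-- Pre_ is exactly where the Python A returns normally: stage must index the 170-element
-- primes list (Python negative indexing included), and M ≠ 0 (range step 0 is a ValueError).
def Pre_get_long_path_stage_groups (N : Int) (M : Int) (stage : Int) : Prop :=
  (-170 ≤ stage ∧ stage < 170) ∧ M ≠ 0
instance (N : Int) (M : Int) (stage : Int) : Decidable (Pre_get_long_path_stage_groups N M stage) := by
  unfold Pre_get_long_path_stage_groups; infer_instance

def pvWitness_get_long_path_stage_groups : Int × Int × Int := (7, 2, 1)

def Spec_get_long_path_stage_groups (N : Int) (M : Int) (stage : Int) (out : List (List Int)) : Prop := out = get_long_path_stage_groups_alt N M stage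
instance (N : Int) (M : Int) (stage : Int) (out : List (List Int)) : Decidable (Spec_get_long_path_stage_groups N M stage out) := by unfold Spec_get_long_path_stage_groups; infer_instance

-- ===== CLAIM =====
def Claim_equal_get_long_path_stage_groups : Prop := ∀ (N : Int) (M : Int) (stage : Int), Dom_get_long_path_stage_groups N M stage → Pre_get_long_path_stage_groups N M stage → Spec_get_long_path_stage_groups N M stage (get_long_path_stage_groups N M stage)

-- ===== LEMMAS AND PROOFS =====

-- B's trial-division loop produces exactly A's literal table of the first 170 primes.
set_option maxRecDepth 100000 in
theorem pv_primes_eq : pvGenPrimes 1012 2 [] = [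
    2,  3,  5,  7, 11, 13, 17, 19, 23, 29,
    31, 37, 41, 43, 47, 53, 59, 61, 67, 71,
    73, 79, 83, 89, 97,101,103,107,109,113,
    127,131,137,139,149,151,157,163,167,173,
    179,181,191,193,197,199,211,223,227,229,
    233,239,241,251,257,263,269,271,277,281,
    283,293,307,311,313,317,331,337,347,349,
    353,359,367,373,379,383,389,397,401,409,
    419,421,431,433,439,443,449,457,461,463,
    467,479,487,491,499,503,509,521,523,541,
    547,557,563,569,571,577,587,593,599,601,
    607,613,617,619,631,641,643,647,653,659,
    661,673,677,683,691,701,709,719,727,733,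
    739,743,751,757,761,769,773,787,797,809,
    811,821,823,827,829,839,853,857,859,863,
    877,881,883,887,907,911,919,929,937,941,
    947,953,967,971,977,983,991,997,1009,1013] := by decide

-- One bucketing pass over xs distributes each n into bucket (n % p), keeping order:
-- starting from buckets (range p).map g, bucket j ends as g j ++ (the n's with n % p = j).
theorem pv_bucket_foldl (p : Int) (hp : 0 < p) (xs : List Int) (g : Nat → List Int) :
    xs.foldl (fun b n => b.modify (PySem.Int.mod n p).toNat (fun cls => cls ++ [n]))
        ((List.range p.toNat).map g)
      = (List.range p.toNat).map
          (fun j => g j ++ xs.filter (fun n => PySem.Int.mod n p == ((j : Nat) : Int))) := by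
  induction xs generalizing g with
  | nil => simp
  | cons x xs ih =>
    have hm0 : 0 ≤ PySem.Int.mod x p := PySem.Int.mod_nonneg x hp
    have hmlt : PySem.Int.mod x p < p := PySem.Int.mod_lt x hp
    have hstep : ((List.range p.toNat).map g).modify (PySem.Int.mod x p).toNat
          (fun cls => cls ++ [x])
        = (List.range p.toNat).map
            (fun j => if j = (PySem.Int.mod x p).toNat then g j ++ [x] else g j) := by
      apply List.ext_getElem
      · simp
      · intro i h1 h2
        simp only [List.getElem_modify, List.getElem_map, List.getElem_range]
        by_cases h : (PySem.Int.mod x p).toNat = i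
        · simp [h]
        · simp [h, Ne.symm h]
    rw [List.foldl_cons, hstep, ih]
    apply List.map_congr_left
    intro j hj
    by_cases hji : j = (PySem.Int.mod x p).toNat
    · have hmod : PySem.Int.mod x p = ((j : Nat) : Int) := by
        subst hji; exact (Int.toNat_of_nonneg hm0).symm
      rw [if_pos hji, List.filter_cons, if_pos (by simp [hmod]), List.append_assoc,
        List.singleton_append]
    · have hmod : ¬ (PySem.Int.mod x p = ((j : Nat) : Int)) := by
        intro h; apply hji; rw [h]; simp
      rw [if_neg hji, List.filter_cons, if_neg (by simp [hmod])]

-- ===== VERDICT =====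
set_option maxRecDepth 100000 in
theorem get_long_path_stage_groups_spec : Claim_equal_get_long_path_stage_groups := by
  intro N M stage _ hpre
  obtain ⟨⟨hlo, hhi⟩, _⟩ := hpre
  unfold Spec_get_long_path_stage_groups
  simp only [get_long_path_stage_groups, get_long_path_stage_groups_alt, pv_primes_eq]
  generalize hP : (PySem.List.pyGet? ([
    2,  3,  5,  7, 11, 13, 17, 19, 23, 29,
    31, 37, 41, 43, 47, 53, 59, 61, 67, 71,
    73, 79, 83, 89, 97,101,103,107,109,113,
    127,131,137,139,149,151,157,163,167,173,
    179,181,191,193,197,199,211,223,227,229,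
    233,239,241,251,257,263,269,271,277,281,
    283,293,307,311,313,317,331,337,347,349,
    353,359,367,373,379,383,389,397,401,409,
    419,421,431,433,439,443,449,457,461,463,
    467,479,487,491,499,503,509,521,523,541,
    547,557,563,569,571,577,587,593,599,601,
    607,613,617,619,631,641,643,647,653,659,
    661,673,677,683,691,701,709,719,727,733,
    739,743,751,757,761,769,773,787,797,809,
    811,821,823,827,829,839,853,857,859,863,
    877,881,883,887,907,911,919,929,937,941,
    947,953,967,971,977,983,991,997,1009,1013] : List Int) stage).getD 0 = p
  -- p is a member of the 170-element table, hence positive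
  have hp : 0 < p := by
    rw [← hP]
    cases hget : PySem.List.pyGet? _ stage with
    | none =>
      exfalso
      rw [PySem.List.pyGet?_eq_none_iff] at hget
      exact hget (by constructor <;> simp <;> omega)
    | some x =>
      have hx := PySem.List.mem_of_pyGet?_eq_some _ hget
      have hpos : ∀ y ∈ ([
        2,  3,  5,  7, 11, 13, 17, 19, 23, 29,
        31, 37, 41, 43, 47, 53, 59, 61, 67, 71,
        73, 79, 83, 89, 97,101,103,107,109,113,
        127,131,137,139,149,151,157,163,167,173,
        179,181,191,193,197,199,211,223,227,229,
        233,239,241,251,257,263,269,271,277,281,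
        283,293,307,311,313,317,331,337,347,349,
        353,359,367,373,379,383,389,397,401,409,
        419,421,431,433,439,443,449,457,461,463,
        467,479,487,491,499,503,509,521,523,541,
        547,557,563,569,571,577,587,593,599,601,
        607,613,617,619,631,641,643,647,653,659,
        661,673,677,683,691,701,709,719,727,733,
        739,743,751,757,761,769,773,787,797,809,
        811,821,823,827,829,839,853,857,859,863,
        877,881,883,887,907,911,919,929,937,941,
        947,953,967,971,977,983,991,997,1009,1013] : List Int), 0 < y := by decide
      simpa [hget] using hpos x hx
  -- A is a flatMap over the residue classes j = 0 .. p-1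
  rw [PySem.List.foldl_append_eq_flatMap]
  -- B's one-pass buckets are exactly those residue classes, in the same order
  have hrep : (List.replicate p.toNat ([] : List Int))
      = (List.range p.toNat).map (fun _ => ([] : List Int)) := by simp
  rw [hrep, pv_bucket_foldl p hp, PySem.List.pyRange_one 0 p, List.flatMap_map, List.flatMap_map]
  simp
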